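-- pv_equiv track=rewrite | github.com/balibabu/2022 | Semester_5/Class/PIP/Hands On Exercise/Hands-on 4/H4q20.py | isfactorial
-- ===== SOURCE A (Python) =====
-- def isfactorial(n):
--     fact=1
--     c=1
--     largest=1
--     while fact<=n:
--         fact *= c
--         if n%fact==0: largest=fact
--         c += 1
--     return largest
-- ===== SOURCE B (Python) =====
-- def isfactorial(n):
--     # Stage 1: build the list of factorials 1!, 2!, 3!, ... up to n (same values A tests).
--     facts = []
--     fact = 1
--     c = 1
--     while fact <= n:
--         fact *= c
--         facts.append(fact)
--         c += 1
--     # Stage 2: scan it backwards, returning the first (= largest) divisor of n; default 1.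
--     for f in reversed(facts):
--         if n % f == 0:
--             return f
--     return 1
-- ===== Notes on version B (the rewrite author's own statement) =====
-- stated objective: alternative
-- what changed: A's single forward while-loop carrying a 'largest' accumulator is replaced by two staged passes: first build the list of factorials up to n, then scan it in reverse and early-return the first one dividing n (default 1).
import Mathlib
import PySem

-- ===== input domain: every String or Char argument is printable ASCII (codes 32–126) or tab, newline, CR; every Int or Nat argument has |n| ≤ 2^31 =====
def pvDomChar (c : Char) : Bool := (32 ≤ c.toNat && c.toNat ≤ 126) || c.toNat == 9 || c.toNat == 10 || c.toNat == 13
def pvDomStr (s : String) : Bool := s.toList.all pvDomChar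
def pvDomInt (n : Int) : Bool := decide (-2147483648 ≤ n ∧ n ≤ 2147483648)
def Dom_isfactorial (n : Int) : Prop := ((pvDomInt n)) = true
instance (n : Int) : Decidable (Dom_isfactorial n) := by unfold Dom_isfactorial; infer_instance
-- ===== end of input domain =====

-- B replaces A's single accumulator while-loop by two staged passes: build the list of factorials
-- up to n, then reverse-scan it for the first divisor of n (alternative decomposition, same cost).
-- Both ports run on a fuel parameter (n.toNat + 2, more than the iterations either Python performs)
-- purely to make the same computation total.


-- ===== PORT A =====
-- A's while loop over the state (fact, c, largest); one fuel unit per iteration.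
def isfactorialLoopA : Nat → Int → Int → Int → Int → Int
  | 0, _, _, _, largest => largest
  | fuel + 1, n, fact, c, largest =>
    if fact ≤ n then
      isfactorialLoopA fuel n (fact * c) (c + 1)
        (if PySem.Int.mod n (fact * c) == 0 then fact * c else largest)
    else largest

def isfactorial (n : Int) : Int := isfactorialLoopA (n.toNat + 2) n 1 1 1

-- ===== PORT B =====
-- Stage 1 of Source B: the list of factorials appended while fact <= n.
def isfactorialFacts : Nat → Int → Int → Int → List Int
  | 0, _, _, _ => []
  | fuel + 1, n, fact, c =>
    if fact ≤ n then (fact * c) :: isfactorialFacts fuel n (fact * c) (c + 1)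
    else []

-- Stage 2 of Source B: reverse scan, first divisor wins, default 1.
def isfactorial_alt (n : Int) : Int :=
  match (isfactorialFacts (n.toNat + 2) n 1 1).reverse.find?
      (fun f => PySem.Int.mod n f == 0) with
  | some f => f
  | none => 1

-- ===== PRECONDITION & SPEC =====
def Spec_isfactorial (n : Int) (out : Int) : Prop := out = isfactorial_alt n
instance (n : Int) (out : Int) : Decidable (Spec_isfactorial n out) := by unfold Spec_isfactorial; infer_instance

-- ===== CLAIM (what is proved, stated in full; the proofs are below) =====
def Claim_equal_isfactorial : Prop := ∀ (n : Int), Dom_isfactorial n → Spec_isfactorial n (isfactorial n)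

-- ===== LEMMAS AND PROOFS =====

-- A's accumulator loop equals a reverse find? over the list of values it tests,
-- with the accumulator as the default.
lemma loopA_eq_find (n : Int) :
    ∀ (fuel : Nat) (fact c largest : Int),
      isfactorialLoopA fuel n fact c largest =
        match (isfactorialFacts fuel n fact c).reverse.find?
            (fun f => PySem.Int.mod n f == 0) with
        | some f => f
        | none => largest := by
  intro fuel
  induction fuel with
  | zero => intro fact c largest; simp [isfactorialLoopA, isfactorialFacts]
  | succ k ih =>
    intro fact c largest
    by_cases h : fact ≤ n
    · rw [isfactorialLoopA, if_pos h, isfactorialFacts, if_pos h, ih]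
      simp only [List.reverse_cons, List.find?_append]
      cases hf : (isfactorialFacts k n (fact * c) (c + 1)).reverse.find?
          (fun f => PySem.Int.mod n f == 0) with
      | some f => simp
      | none =>
        simp only [Option.none_or, List.find?_singleton]
        by_cases hd : (PySem.Int.mod n (fact * c) == 0) = true <;> simp [hd]
    · rw [isfactorialLoopA, if_neg h, isfactorialFacts, if_neg h]
      simp

-- ===== VERDICT (by name: the statement is the Claim_ definition above) =====
theorem isfactorial_spec : Claim_equal_isfactorial := by
  intro n _
  unfold Spec_isfactorial isfactorial isfactorial_alt
  exact loopA_eq_find n (n.toNat + 2) 1 1 1
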